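-- pv_equiv track=rewrite | github.com/iamtinsae/aoc | 2022/day01/solve.py | get_elf_with_most_calories
-- ===== SOURCE A (Python) =====
-- def get_elf_with_most_calories(inputs) -> int:
--     most_calorie = 0
--
--     elf_calories = 0
--     for calorie in inputs:
--         if calorie == '':
--             if elf_calories > most_calorie:
--                 most_calorie = elf_calories
--             elf_calories = 0
--         else:
--             elf_calories += int(calorie)
--
--     return most_calorie
-- ===== SOURCE B (Python) =====
-- def get_elf_with_most_calories(inputs) -> int:
--     groups = []
--     current = []
--     for c in inputs:
--         if c == '':
--             groups.append(current)
--             current = []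
--         else:
--             current.append(int(c))
--     sums = [sum(g) for g in groups]
--     return max([0] + sums)
-- ===== Notes on version B (the rewrite author's own statement) =====
-- stated objective: alternative
-- what changed: Replaces the one-pass accumulate-and-compare with an explicit grouping pass (split on blank lines, trailing unterminated group dropped as in A) followed by separate sum and max passes over the group list.
import Mathlib
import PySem

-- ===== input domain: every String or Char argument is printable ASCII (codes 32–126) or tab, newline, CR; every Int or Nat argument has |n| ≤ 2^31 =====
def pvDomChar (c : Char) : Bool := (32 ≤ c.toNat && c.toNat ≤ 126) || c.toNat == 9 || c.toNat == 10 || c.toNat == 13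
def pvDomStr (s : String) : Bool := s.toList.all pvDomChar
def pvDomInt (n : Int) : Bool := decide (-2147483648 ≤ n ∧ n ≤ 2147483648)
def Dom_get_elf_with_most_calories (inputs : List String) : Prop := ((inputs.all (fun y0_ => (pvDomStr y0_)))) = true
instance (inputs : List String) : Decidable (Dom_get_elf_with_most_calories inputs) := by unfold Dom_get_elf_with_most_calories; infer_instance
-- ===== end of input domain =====

-- B replaces A's one-pass accumulate-and-compare with a grouping pass (split on blank
-- lines, trailing unterminated group dropped as A does), then separate sum and max passes.


-- int(c); inside Pre_ the parse always succeeds, so getD 0 is never taken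
def pvParse (s : String) : Int := (PySem.Int.ofStr? s).getD 0

-- ===== PORT A =====
def pvLoopA : List String → Int → Int → Int
  | [], most, _ => most
  | c :: rest, most, elf =>
      if c == "" then pvLoopA rest (if elf > most then elf else most) 0
      else pvLoopA rest most (elf + pvParse c)

def get_elf_with_most_calories (inputs : List String) : Int := pvLoopA inputs 0 0

-- ===== PORT B =====
def pvGroups : List String → List (List Int) → List Int → List (List Int)
  | [], gs, _ => gs
  | c :: rest, gs, cur =>
      if c == "" then pvGroups rest (gs ++ [cur]) []
      else pvGroups rest gs (cur ++ [pvParse c])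

def get_elf_with_most_calories_alt (inputs : List String) : Int :=
  let groups := pvGroups inputs [] []
  let sums := groups.map (fun g => g.foldl (· + ·) 0)
  ([(0 : Int)] ++ sums).foldl max 0

-- ===== PRECONDITION & SPEC =====
-- Pre_ excludes exactly the inputs on which int(calorie) raises ValueError in A
def Pre_get_elf_with_most_calories (inputs : List String) : Prop :=
  ∀ s ∈ inputs, s ≠ "" → (PySem.Int.ofStr? s).isSome
instance (inputs : List String) : Decidable (Pre_get_elf_with_most_calories inputs) := by
  unfold Pre_get_elf_with_most_calories; infer_instance

def pvWitness_get_elf_with_most_calories : List String := ["100", "200", "", "150", ""]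

def Spec_get_elf_with_most_calories (inputs : List String) (out : Int) : Prop := out = get_elf_with_most_calories_alt inputs
instance (inputs : List String) (out : Int) : Decidable (Spec_get_elf_with_most_calories inputs out) := by unfold Spec_get_elf_with_most_calories; infer_instance

-- ===== CLAIM (what is proved, stated in full; the proofs are below) =====
def Claim_equal_get_elf_with_most_calories : Prop := ∀ (inputs : List String), Dom_get_elf_with_most_calories inputs → Pre_get_elf_with_most_calories inputs → Spec_get_elf_with_most_calories inputs (get_elf_with_most_calories inputs)

-- ===== LEMMAS AND PROOFS =====
-- the group sums produced while scanning `inputs` with partial sum `elf`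
def pvGSums : List String → Int → List Int
  | [], _ => []
  | c :: rest, elf =>
      if c == "" then elf :: pvGSums rest 0
      else pvGSums rest (elf + pvParse c)

theorem pvLoopA_eq (inputs : List String) : ∀ most elf,
    pvLoopA inputs most elf = (pvGSums inputs elf).foldl max most := by
  induction inputs with
  | nil => intro most elf; simp [pvLoopA, pvGSums]
  | cons c rest ih =>
    intro most elf
    by_cases h : c = ""
    · simp [pvLoopA, pvGSums, h, ih, max_def]
      congr 1
      omega
    · simp [pvLoopA, pvGSums, h, ih]

theorem pvGroups_eq (inputs : List String) : ∀ (gs : List (List Int)) (cur : List Int),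
    (pvGroups inputs gs cur).map (fun g => g.foldl (· + ·) 0)
      = gs.map (fun g => g.foldl (· + ·) 0) ++ pvGSums inputs (cur.foldl (· + ·) 0) := by
  induction inputs with
  | nil => intro gs cur; simp [pvGroups, pvGSums]
  | cons c rest ih =>
    intro gs cur
    by_cases h : c = ""
    · simp [pvGroups, pvGSums, h, ih]
    · simp [pvGroups, pvGSums, h, ih, List.foldl_append]

-- ===== VERDICT (by name: the statement is the Claim_ definition above) =====
theorem get_elf_with_most_calories_spec : Claim_equal_get_elf_with_most_calories := by
  intro inputs _ _
  unfold Spec_get_elf_with_most_calories get_elf_with_most_calories get_elf_with_most_calories_alt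
  rw [pvLoopA_eq]
  simp only []
  rw [pvGroups_eq]
  simp [List.foldl]
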